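-- pv_equiv track=rewrite | github.com/figure-2/Algorithm | programmers/코테_입문/89percent/개미군단.py | solution
-- ===== SOURCE A (Python) =====
-- def solution(hp):
--     answer = 0
--     while hp > 0:
--         if hp // 5 > 0:
--             answer += hp // 5
--             hp -= 5 * (hp // 5)
--         elif hp // 3 > 0 :
--             answer += hp // 3
--             hp -= 3 * (hp // 3)
--         elif hp // 1 > 0:
--             answer += hp // 1
--             hp -= 1 * (hp // 1)
--     return answer
-- ===== SOURCE B (Python) =====
-- def solution(hp):
--     if hp <= 0:
--         return 0
--     return hp // 5 + (hp % 5) // 3 + (hp % 5) % 3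
-- ===== Notes on version B (the rewrite author's own statement) =====
-- stated objective: simpler
-- what changed: Replaced the three-stage greedy while loop with a direct closed-form expression hp//5 + (hp%5)//3 + (hp%5)%3 (0 for non-positive hp).
import Mathlib
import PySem

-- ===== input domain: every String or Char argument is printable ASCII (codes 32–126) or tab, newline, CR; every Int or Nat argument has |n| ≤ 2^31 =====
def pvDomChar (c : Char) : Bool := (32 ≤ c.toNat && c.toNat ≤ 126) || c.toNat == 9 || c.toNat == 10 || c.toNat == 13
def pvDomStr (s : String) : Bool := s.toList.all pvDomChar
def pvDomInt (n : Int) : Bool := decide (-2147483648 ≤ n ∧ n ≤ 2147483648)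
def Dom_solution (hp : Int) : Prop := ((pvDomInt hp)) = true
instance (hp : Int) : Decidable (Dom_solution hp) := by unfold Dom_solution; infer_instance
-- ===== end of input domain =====

-- B replaces A's three-stage greedy while loop by the closed form hp//5 + (hp%5)//3 + (hp%5)%3 (simpler).

-- ===== PORT A =====
-- the while loop, as structural recursion on hp (hp strictly decreases each iteration)
def solutionGo (hp answer : Int) : Int :=
  if _hpos : hp > 0 then
    if _h5 : PySem.Int.floordiv hp 5 > 0 then
      solutionGo (hp - 5 * PySem.Int.floordiv hp 5) (answer + PySem.Int.floordiv hp 5)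
    else if _h3 : PySem.Int.floordiv hp 3 > 0 then
      solutionGo (hp - 3 * PySem.Int.floordiv hp 3) (answer + PySem.Int.floordiv hp 3)
    else if _h1 : PySem.Int.floordiv hp 1 > 0 then
      solutionGo (hp - 1 * PySem.Int.floordiv hp 1) (answer + PySem.Int.floordiv hp 1)
    else answer  -- unreachable for integers: hp > 0 implies hp // 1 > 0
  else answer
termination_by hp.toNat
decreasing_by
  · have h := PySem.Int.floordiv_mul_add_mod hp 5
    have h0 : 0 ≤ PySem.Int.mod hp 5 := by
      have := PySem.Int.mod_eq_emod_of_pos (a := hp) (b := 5) (by norm_num)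
      omega
    omega
  · have h := PySem.Int.floordiv_mul_add_mod hp 3
    have h0 : 0 ≤ PySem.Int.mod hp 3 := by
      have := PySem.Int.mod_eq_emod_of_pos (a := hp) (b := 3) (by norm_num)
      omega
    omega
  · have h := PySem.Int.floordiv_mul_add_mod hp 1
    have _h0 : 0 ≤ PySem.Int.mod hp 1 := by
      have := PySem.Int.mod_eq_emod_of_pos (a := hp) (b := 1) (by norm_num)
      omega
    omega

def solution (hp : Int) : Int := solutionGo hp 0

-- ===== PORT B =====
def solution_alt (hp : Int) : Int :=
  if hp ≤ 0 then 0
  else PySem.Int.floordiv hp 5 + PySem.Int.floordiv (PySem.Int.mod hp 5) 3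
         + PySem.Int.mod (PySem.Int.mod hp 5) 3

-- ===== PRECONDITION & SPEC =====
def Spec_solution (hp : Int) (out : Int) : Prop := out = solution_alt hp
instance (hp : Int) (out : Int) : Decidable (Spec_solution hp out) := by unfold Spec_solution; infer_instance

-- ===== CLAIM (what is proved, stated in full; the proofs are below) =====
def Claim_equal_solution : Prop := ∀ (hp : Int), Dom_solution hp → Spec_solution hp (solution hp)

-- ===== LEMMAS AND PROOFS =====

-- for 0 ≤ r < 5 the loop contributes r//3 + r%3
theorem solutionGo_small (r : Int) (h0 : 0 ≤ r) (h5 : r < 5) (a : Int) :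
    solutionGo r a = a + PySem.Int.floordiv r 3 + PySem.Int.mod r 3 := by
  interval_cases r <;>
    simp [solutionGo, PySem.Int.floordiv, PySem.Int.mod]

theorem solutionGo_eq (hp a : Int) :
    solutionGo hp a = a + solution_alt hp := by
  by_cases hpos : hp > 0
  · have hdiv := PySem.Int.floordiv_mul_add_mod hp 5
    have hm5 : PySem.Int.mod hp 5 = hp % 5 :=
      PySem.Int.mod_eq_emod_of_pos (by norm_num)
    have hr0 : 0 ≤ PySem.Int.mod hp 5 := by omega
    have hr5 : PySem.Int.mod hp 5 < 5 := by omega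
    by_cases hq : PySem.Int.floordiv hp 5 > 0
    · rw [solutionGo]
      simp only [hpos, hq, dif_pos]
      have hrem : hp - 5 * PySem.Int.floordiv hp 5 = PySem.Int.mod hp 5 := by omega
      rw [hrem, solutionGo_small _ hr0 hr5, solution_alt]
      simp only [show ¬ hp ≤ 0 by omega, if_false]
      ring
    · -- hp < 5, so hp itself is the small remainder
      have hsm : hp < 5 := by
        by_contra h
        have : PySem.Int.floordiv hp 5 > 0 := by
          have := PySem.Int.floordiv_eq_iff_of_pos (a := hp) (b := 5) (q := PySem.Int.floordiv hp 5) (by norm_num) |>.mpr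
          omega
        omega
      have hmod : PySem.Int.mod hp 5 = hp := by omega
      rw [solutionGo_small hp (by omega) hsm, solution_alt]
      simp only [show ¬ hp ≤ 0 by omega, if_false, hmod]
      have : PySem.Int.floordiv hp 5 = 0 := by omega
      rw [this]; ring
  · rw [solutionGo, solution_alt]
    simp [hpos, show hp ≤ 0 by omega]

-- ===== VERDICT (by name: the statement is the Claim_ definition above) =====
theorem solution_spec : Claim_equal_solution := by
  intro hp _
  unfold Spec_solution solution
  rw [solutionGo_eq]; ring
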